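-- pv_equiv track=rewrite | github.com/pypi-data/pypi-mirror-123 | packages/ndl-tense/ndl_tense-0.0.3.tar.gz/ndl_tense-0.0.3/ndl_tense/file_tools.py | find_article
-- ===== SOURCE A (Python) =====
-- def find_article(line, word):
--     """
--         Find an article relevant to a given word
--
--         Variables
--         ------------------------------------------
--
--         line: list of str
--             A list of words that make up a sentence
--         word: str
--             A word (noun), this is the word the article should apply to
--         ------------------------------------------
--         return:
--             Either an article or None (if no article could be found)
--     """
--     i = line.index(word) - 1
--     while i >= 0:
--         if line[i] in ['The', 'the', 'a', 'an', 'An', 'A', 'no']: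
--             return line[i]
--         else:
--             i -= 1
--     return None
-- ===== SOURCE B (Python) =====
-- ARTICLES = {'The', 'the', 'a', 'an', 'An', 'A', 'no'}
--
-- def find_article(line, word):
--     i = line.index(word)          # keep ValueError when word is absent
--     last = None
--     for w in line[:i]:
--         if w in ARTICLES:
--             last = w
--     return last
-- ===== Notes on version B (the rewrite author's own statement) =====
-- stated objective: alternative
-- what changed: Replaces A's backward early-return scan (index arithmetic with a while-loop over line[i]) with a forward single pass over the prefix line[:i] keeping a 'last seen article' accumulator.
import Mathlib
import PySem

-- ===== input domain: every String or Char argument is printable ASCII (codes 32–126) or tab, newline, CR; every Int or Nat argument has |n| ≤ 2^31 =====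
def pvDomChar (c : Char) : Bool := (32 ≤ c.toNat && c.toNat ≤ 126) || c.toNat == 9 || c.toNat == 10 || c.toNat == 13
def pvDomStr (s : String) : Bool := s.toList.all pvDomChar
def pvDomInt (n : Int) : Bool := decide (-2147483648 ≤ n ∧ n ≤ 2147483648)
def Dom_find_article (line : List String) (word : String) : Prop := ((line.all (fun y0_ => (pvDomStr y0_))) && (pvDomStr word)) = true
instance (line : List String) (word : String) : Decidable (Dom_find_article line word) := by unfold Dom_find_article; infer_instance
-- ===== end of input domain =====

-- B replaces A's backward early-return scan with a forward pass over the prefix keeping a last-seen-article accumulator (alternative decomposition, same cost).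


-- the article list ['The','the','a','an','An','A','no'] shared by both sources
def pvArticles : List String := ["The", "the", "a", "an", "An", "A", "no"]

-- ===== PORT A =====
-- the while-loop: i counts down from index-1 while i >= 0, returning line[i] on the first article
def find_article_go (line : List String) (i : Int) : Option String :=
  if _h : 0 ≤ i then
    let x := PySem.List.pyGetD line i ""
    if pvArticles.contains x then some x
    else find_article_go line (i - 1)
  else none
termination_by (i + 1).toNat
decreasing_by omega

def find_article (line : List String) (word : String) : Option String :=
  match PySem.List.index? line word with
  | none => none        -- Python raises ValueError here; excluded by Pre_
  | some i => find_article_go line ((i : Int) - 1)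

-- ===== PORT B =====
def find_article_alt (line : List String) (word : String) : Option String :=
  match PySem.List.index? line word with
  | none => none        -- Python raises ValueError here; excluded by Pre_
  | some i =>
      (PySem.List.slice line none (some (i : Int))).foldl
        (fun last w => if pvArticles.contains w then some w else last) none

-- ===== PRECONDITION & SPEC =====
-- Pre_ excludes exactly the inputs where line.index(word) raises ValueError in both programs.
def Pre_find_article (line : List String) (word : String) : Prop := word ∈ line
instance (line : List String) (word : String) : Decidable (Pre_find_article line word) := by
  unfold Pre_find_article; infer_instance

def pvWitness_find_article : List String × String := (["the", "cat"], "cat")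

def Spec_find_article (line : List String) (word : String) (out : Option String) : Prop :=
  out = find_article_alt line word
instance (line : List String) (word : String) (out : Option String) :
    Decidable (Spec_find_article line word out) := by unfold Spec_find_article; infer_instance

-- ===== CLAIM (what is proved, stated in full; the proofs are below) =====
def Claim_equal_find_article : Prop := ∀ (line : List String) (word : String),
  Dom_find_article line word → Pre_find_article line word →
  Spec_find_article line word (find_article line word)

-- ===== LEMMAS AND PROOFS =====

-- B's forward last-seen fold equals the first article of the reversed list (or the accumulator).
theorem foldl_last_article (p : List String) (acc : Option String) :
    p.foldl (fun last w => if pvArticles.contains w then some w else last) acc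
      = (p.reverse.find? (fun w => pvArticles.contains w)).or acc := by
  induction p using List.reverseRecOn generalizing acc with
  | nil => simp
  | append_singleton p x ih =>
      simp only [List.foldl_append, List.foldl_cons, List.foldl_nil, List.reverse_append,
        List.reverse_singleton, List.singleton_append, List.find?_cons, ih]
      by_cases h : x ∈ pvArticles <;> simp [h]

-- A's backward early-return loop starting at i-1 finds the first article of (l.take i).reverse.
theorem go_eq_find (l : List String) :
    ∀ i : Nat, i ≤ l.length →
      find_article_go l ((i : Int) - 1)
        = (l.take i).reverse.find? (fun w => pvArticles.contains w) := by
  intro i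
  induction i with
  | zero => intro _; rw [find_article_go]; simp
  | succ n ih =>
      intro h
      have hn : n < l.length := by omega
      obtain ⟨x, hx⟩ : ∃ x, l[n]? = some x := ⟨l[n], List.getElem?_eq_getElem hn⟩
      have htake : l.take (n + 1) = l.take n ++ [x] := by
        rw [List.take_add_one, hx]; rfl
      rw [show ((n + 1 : Nat) : Int) - 1 = (n : Int) by push_cast; ring]
      rw [find_article_go]
      have hget : PySem.List.pyGetD l ((n : Nat) : Int) "" = x := by
        simp [List.getD, hx]
      simp only [Int.natCast_nonneg, dite_true, hget, htake, List.reverse_append,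
        List.reverse_singleton, List.singleton_append, List.find?_cons]
      by_cases harts : x ∈ pvArticles
      · simp [harts]
      · simp only [List.contains_eq_mem, harts, if_neg, not_false_eq_true,
          decide_false, Bool.false_eq_true]
        rw [ih (by omega)]; simp [List.contains_eq_mem]

-- ===== VERDICT (by name: the statement is the Claim_ definition above) =====
theorem find_article_spec : Claim_equal_find_article := by
  intro line word _ hpre
  unfold Spec_find_article find_article find_article_alt
  have hmem : (PySem.List.index? line word).isSome := by
    rw [PySem.List.index?_isSome_iff]; exact hpre
  obtain ⟨i, hi⟩ := Option.isSome_iff_exists.mp hmem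
  obtain ⟨hlt, -, -⟩ := PySem.List.getElem_of_index?_eq_some hi
  simp only [hi]
  rw [go_eq_find _ i (le_of_lt hlt), PySem.List.slice_to_natCast,
    foldl_last_article, Option.or_none]
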